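-- pv_equiv track=rewrite | github.com/willyhndz3/clay_utilities | ele_members_json_scraper.py | determine_member_type
-- ===== SOURCE A (Python) =====
-- def determine_member_type(roles: list) -> str:
--     """Determine member type from roles"""
--     if not roles:
--         return "Standard Member"
--
--     # Priority order for member types
--     role_priority = {
--         'ele_industry_legend': 'Industry Legend',
--         'ele_executive': 'Executive',
--         'ele_cdo': 'CDO',
--         'ele_ambassador': 'Ambassador',
--         'ele_producer': 'Producer',
--         'contributor': 'Contributor',
--         'ele_tmec': 'TMEC',
--         'ele_onboarding_buddy': 'Onboarding Buddy',
--         'rcp_partner_member': 'Partner Member',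
--         'rcp_ele_member': 'ELE Member',
--         'rcp_online-only_member': 'Online-Only Member',
--         'invited': 'Invited',
--         'subscriber': 'Subscriber',
--         'member': 'Member'
--     }
--
--     # Find highest priority role
--     for role_key, role_name in role_priority.items():
--         if role_key in roles:
--             return role_name
--
--     # If no known role, join all roles
--     return ', '.join(roles)
-- ===== SOURCE B (Python) =====
-- PRIORITY_KEYS = [
--     'ele_industry_legend', 'ele_executive', 'ele_cdo', 'ele_ambassador',
--     'ele_producer', 'contributor', 'ele_tmec', 'ele_onboarding_buddy',
--     'rcp_partner_member', 'rcp_ele_member', 'rcp_online-only_member',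
--     'invited', 'subscriber', 'member',
-- ]
-- PRIORITY_LABELS = [
--     'Industry Legend', 'Executive', 'CDO', 'Ambassador',
--     'Producer', 'Contributor', 'TMEC', 'Onboarding Buddy',
--     'Partner Member', 'ELE Member', 'Online-Only Member',
--     'Invited', 'Subscriber', 'Member',
-- ]
--
-- def determine_member_type(roles: list) -> str:
--     """Determine member type from roles"""
--     if not roles:
--         return "Standard Member"
--     best = None
--     for role in roles:
--         if role in PRIORITY_KEYS:
--             rank = PRIORITY_KEYS.index(role)
--             if best is None or rank < best:
--                 best = rank
--     if best is None:
--         return ', '.join(roles)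
--     return PRIORITY_LABELS[best]
-- ===== Notes on version B (the rewrite author's own statement) =====
-- stated objective: alternative
-- what changed: B loops once over the input roles tracking the smallest priority rank found via list index lookup, instead of A's scan over the fixed 14-entry priority dict with a membership test against roles per entry.
import Mathlib
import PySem

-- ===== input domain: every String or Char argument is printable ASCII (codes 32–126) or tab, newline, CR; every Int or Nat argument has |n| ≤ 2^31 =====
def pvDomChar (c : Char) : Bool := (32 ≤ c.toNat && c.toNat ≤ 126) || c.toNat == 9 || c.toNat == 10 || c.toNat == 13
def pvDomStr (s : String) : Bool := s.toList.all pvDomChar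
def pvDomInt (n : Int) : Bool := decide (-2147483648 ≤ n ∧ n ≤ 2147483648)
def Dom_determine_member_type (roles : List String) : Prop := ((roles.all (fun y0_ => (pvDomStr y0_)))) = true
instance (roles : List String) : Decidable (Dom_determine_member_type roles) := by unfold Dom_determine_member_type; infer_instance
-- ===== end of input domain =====

-- B replaces A's scan of the fixed priority table (with a membership test against
-- `roles` per entry) by a single pass over `roles` that tracks the smallest
-- priority rank seen; objective: alternative decomposition, same cost class.

-- ===== PORT A =====
def pvRolePriority : List (String × String) :=
  [("ele_industry_legend", "Industry Legend"),
   ("ele_executive", "Executive"),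
   ("ele_cdo", "CDO"),
   ("ele_ambassador", "Ambassador"),
   ("ele_producer", "Producer"),
   ("contributor", "Contributor"),
   ("ele_tmec", "TMEC"),
   ("ele_onboarding_buddy", "Onboarding Buddy"),
   ("rcp_partner_member", "Partner Member"),
   ("rcp_ele_member", "ELE Member"),
   ("rcp_online-only_member", "Online-Only Member"),
   ("invited", "Invited"),
   ("subscriber", "Subscriber"),
   ("member", "Member")]

-- the `for role_key, role_name in role_priority.items(): if role_key in roles: return role_name` loop
def pvScanA : List (String × String) → List String → Option String
  | [], _ => none
  | (k, v) :: rest, roles => if roles.contains k then some v else pvScanA rest roles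

def determine_member_type (roles : List String) : String :=
  if roles.isEmpty then "Standard Member"
  else
    match pvScanA pvRolePriority roles with
    | some v => v
    | none => PySem.Str.join ", " roles

-- ===== PORT B =====
def pvPriorityKeys : List String :=
  ["ele_industry_legend", "ele_executive", "ele_cdo", "ele_ambassador",
   "ele_producer", "contributor", "ele_tmec", "ele_onboarding_buddy",
   "rcp_partner_member", "rcp_ele_member", "rcp_online-only_member",
   "invited", "subscriber", "member"]

def pvPriorityLabels : List String :=
  ["Industry Legend", "Executive", "CDO", "Ambassador",
   "Producer", "Contributor", "TMEC", "Onboarding Buddy",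
   "Partner Member", "ELE Member", "Online-Only Member",
   "Invited", "Subscriber", "Member"]

-- body of Source B's `for role in roles:` loop (role in KEYS / KEYS.index(role) = index?)
def pvBestStep (best : Option Nat) (role : String) : Option Nat :=
  match PySem.List.index? pvPriorityKeys role with
  | none => best
  | some rank =>
    match best with
    | none => some rank
    | some b => if rank < b then some rank else best

def determine_member_type_alt (roles : List String) : String :=
  if roles.isEmpty then "Standard Member"
  else
    match roles.foldl pvBestStep none with
    | none => PySem.Str.join ", " roles
    | some best => PySem.List.pyGetD pvPriorityLabels (best : Int) ""

-- ===== PRECONDITION & SPEC =====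
def Spec_determine_member_type (roles : List String) (out : String) : Prop := out = determine_member_type_alt roles
instance (roles : List String) (out : String) : Decidable (Spec_determine_member_type roles out) := by unfold Spec_determine_member_type; infer_instance

-- ===== CLAIM (what is proved, stated in full; the proofs are below) =====
def Claim_equal_determine_member_type : Prop := ∀ (roles : List String), Dom_determine_member_type roles → Spec_determine_member_type roles (determine_member_type roles)

-- ===== LEMMAS AND PROOFS =====

-- B's loop body, generalized over the rank-lookup function
def pvStep (f : String → Option Nat) (acc : Option Nat) (r : String) : Option Nat :=
  match f r with
  | none => acc
  | some rank =>
    match acc with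
    | none => some rank
    | some b => if rank < b then some rank else acc

theorem pvBestStep_eq : pvBestStep = pvStep (fun r => PySem.List.index? pvPriorityKeys r) := rfl

theorem pvFold_const (f : String → Option Nat) (roles : List String)
    (h : ∀ r ∈ roles, f r = none) :
    ∀ acc, roles.foldl (pvStep f) acc = acc := by
  induction roles with
  | nil => intro acc; rfl
  | cons r rs ih =>
    intro acc
    have hr : f r = none := h r (by simp)
    simp only [List.foldl_cons, pvStep, hr]
    exact ih (fun x hx => h x (by simp [hx])) acc

theorem pvFold_zero (f : String → Option Nat) (roles : List String) :
    ∀ acc, ((∃ r ∈ roles, f r = some 0) ∨ acc = some 0) →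
    roles.foldl (pvStep f) acc = some 0 := by
  induction roles with
  | nil =>
    intro acc h
    rcases h with ⟨r, hr, _⟩ | h
    · exact absurd hr (List.not_mem_nil)
    · simpa using h
  | cons r rs ih =>
    intro acc h
    simp only [List.foldl_cons]
    rcases h with ⟨x, hx, hfx⟩ | hacc
    · rcases List.mem_cons.mp hx with rfl | hxs
      · -- the head realizes rank 0: the new accumulator is some 0
        apply ih; right
        simp only [pvStep, hfx]
        cases acc with
        | none => rfl
        | some b =>
          by_cases hb : 0 < b
          · simp [hb]
          · have : b = 0 := by omega
            simp [this]
      · exact ih _ (Or.inl ⟨x, hxs, hfx⟩)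
    · subst hacc
      apply ih; right
      simp only [pvStep]
      cases hfr : f r with
      | none => rfl
      | some i => simp
theorem pvFold_shift (f f' : String → Option Nat) (roles : List String)
    (h : ∀ r ∈ roles, f r = (f' r).map (· + 1)) :
    ∀ acc, roles.foldl (pvStep f) (acc.map (· + 1)) =
      (roles.foldl (pvStep f') acc).map (· + 1) := by
  induction roles with
  | nil => intro acc; rfl
  | cons r rs ih =>
    intro acc
    have hr : f r = (f' r).map (· + 1) := h r (by simp)
    have hstep : pvStep f (acc.map (· + 1)) r = (pvStep f' acc r).map (· + 1) := by
      simp only [pvStep, hr]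
      cases f' r with
      | none => rfl
      | some i =>
        cases acc with
        | none => rfl
        | some b =>
          simp only [Option.map_some]
          by_cases hib : i < b
          · simp [hib]
          · simp [hib]
    simp only [List.foldl_cons, hstep]
    exact ih (fun x hx => h x (by simp [hx])) _

theorem pvScanA_eq (P : List (String × String)) (roles : List String) :
    pvScanA P roles =
      (roles.foldl (pvStep (fun r => PySem.List.index? (P.map Prod.fst) r)) none).map
        (fun i => (P.map Prod.snd).getD i "") := by
  induction P generalizing roles with
  | nil =>
    simp only [List.map_nil]
    rw [pvFold_const (fun r => PySem.List.index? ([] : List String) r) roles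
      (fun r _ => (PySem.List.index?_eq_none_iff _ r).mpr (by simp)) none]
    rfl
  | cons kv P' ih =>
    obtain ⟨k, v⟩ := kv
    by_cases hk : k ∈ roles
    · have : pvScanA ((k, v) :: P') roles = some v := by
        simp [pvScanA, hk]
      rw [this]
      have hfk : PySem.List.index? (((k, v) :: P').map Prod.fst) k = some 0 := by
        simp only [List.map_cons]
        exact PySem.List.index?_cons_self k _
      rw [pvFold_zero _ _ none (Or.inl ⟨k, hk, hfk⟩)]
      rfl
    · have hscan : pvScanA ((k, v) :: P') roles = pvScanA P' roles := by
        simp [pvScanA, hk]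
      have hsh : ∀ r ∈ roles,
          PySem.List.index? (((k, v) :: P').map Prod.fst) r =
            (PySem.List.index? (P'.map Prod.fst) r).map (· + 1) := by
        intro r hr
        have hne : k ≠ r := fun h => hk (h ▸ hr)
        simp only [List.map_cons]
        exact PySem.List.index?_cons_of_ne _ hne
      have := pvFold_shift _ _ roles hsh none
      simp only [Option.map_none] at this
      rw [hscan, ih, this, Option.map_map]
      cases roles.foldl (pvStep (fun r => PySem.List.index? (P'.map Prod.fst) r)) none with
      | none => rfl
      | some i => simp [Function.comp]

-- ===== VERDICT (by name: the statement is the Claim_ definition above) =====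
theorem determine_member_type_spec : Claim_equal_determine_member_type := by
  intro roles _
  unfold Spec_determine_member_type determine_member_type determine_member_type_alt
  by_cases he : roles.isEmpty
  · simp [he]
  · simp only [he]
    rw [pvBestStep_eq]
    have hkeys : pvRolePriority.map Prod.fst = pvPriorityKeys := rfl
    have hlabels : pvRolePriority.map Prod.snd = pvPriorityLabels := rfl
    have := pvScanA_eq pvRolePriority roles
    rw [hkeys, hlabels] at this
    rw [this]
    cases roles.foldl (pvStep (fun r => PySem.List.index? pvPriorityKeys r)) none with
    | none => rfl
    | some i => simp [PySem.List.pyGetD_natCast]
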